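-- pv_equiv track=rewrite | github.com/KiraraGho/projectPY2_Shinkarenko_M25_555 | src/primitive_db/engine.py | _parse_values_list
-- ===== SOURCE A (Python) =====
-- def _parse_values_list(values_part: str) -> list[str] | None:
--     s = values_part.strip()
--     if not (s.startswith("(") and s.endswith(")")):
--         return None
--
--     inner = s[1:-1].strip()
--     if inner == "":
--         return []
--
--     result: list[str] = []
--     buf: list[str] = []
--     in_quotes: str | None = None
--
--     for ch in inner:
--         if ch in {"'", '"'}:
--             if in_quotes is None:
--                 in_quotes = ch
--             elif in_quotes == ch:
--                 in_quotes = None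
--             buf.append(ch)
--             continue
--
--         # Запятая — разделитель только вне кавычек
--         if ch == "," and in_quotes is None:
--             token = "".join(buf).strip()
--             if token == "":
--                 return None
--             result.append(token)
--             buf = []
--             continue
--
--         buf.append(ch)
--
--     token = "".join(buf).strip()
--     if token == "":
--         return None
--     result.append(token)
--
--     return result
-- ===== SOURCE B (Python) =====
-- def _parse_values_list(values_part: str) -> list[str] | None:
--     s = values_part.strip()
--     if not (s.startswith("(") and s.endswith(")")):
--         return None
--     inner = s[1:-1].strip()
--     if inner == "":
--         return []
--     # one scan recording the indices of top-level (unquoted) separator commas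
--     cuts: list[int] = []
--     q: str | None = None
--     for i, ch in enumerate(inner):
--         if ch in ("'", '"'):
--             if q is None:
--                 q = ch
--             elif q == ch:
--                 q = None
--         elif ch == "," and q is None:
--             cuts.append(i)
--     starts = [0] + [i + 1 for i in cuts]
--     ends = cuts + [len(inner)]
--     toks = [inner[a:b].strip() for a, b in zip(starts, ends)]
--     if "" in toks:
--         return None
--     return toks
-- ===== Notes on version B (the rewrite author's own statement) =====
-- stated objective: alternative
-- what changed: A interleaves everything in one loop over a growing character buffer (append chars, strip/validate and early-return at each top-level comma); B instead does one scan that only records the indices of unquoted separator commas, then builds the tokens by slicing the inner string between consecutive cut indices and validates all stripped slices in a separate pass.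
import Mathlib
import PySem

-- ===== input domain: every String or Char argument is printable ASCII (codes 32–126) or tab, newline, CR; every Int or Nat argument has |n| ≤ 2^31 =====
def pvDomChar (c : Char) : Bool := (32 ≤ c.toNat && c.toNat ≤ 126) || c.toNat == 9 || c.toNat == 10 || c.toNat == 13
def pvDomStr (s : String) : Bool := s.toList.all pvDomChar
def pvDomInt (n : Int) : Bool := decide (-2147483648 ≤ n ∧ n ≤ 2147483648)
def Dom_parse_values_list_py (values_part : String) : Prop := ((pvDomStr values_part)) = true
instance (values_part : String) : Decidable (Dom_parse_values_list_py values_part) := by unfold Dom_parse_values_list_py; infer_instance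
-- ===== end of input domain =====

-- B replaces A's char-buffer loop with interleaved validation by one scan that records
-- top-level comma indices, then slices and strips the segments (alternative decomposition).

-- ===== PORT A =====
-- ch in {"'", '"'}  (used by both Pythons)
def pvIsQuote (c : Char) : Bool := c == '\'' || c == '"'

-- A's for-loop over inner: state buf / in_quotes / result, early return None on empty token
def parseAuxA : List Char → List Char → Option Char → List String → Option (List String)
  | [], buf, _, res =>
      let token := PySem.Chars.strip buf
      if token = [] then none else some (res ++ [String.ofList token])
  | c :: rest, buf, q, res =>
      if pvIsQuote c then
        parseAuxA rest (buf ++ [c])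
          (match q with
           | none => some c
           | some qc => if qc == c then none else some qc) res
      else if c == ',' && q == none then
        let token := PySem.Chars.strip buf
        if token = [] then none
        else parseAuxA rest [] q (res ++ [String.ofList token])
      else parseAuxA rest (buf ++ [c]) q res

def parse_values_list_py (values_part : String) : Option (List String) :=
  let s := PySem.Chars.strip values_part.toList
  if !(PySem.Chars.startswith s ['('] && PySem.Chars.endswith s [')']) then none
  else
    let inner := PySem.Chars.strip (PySem.List.slice s (some 1) (some (-1)))
    if inner = [] then some []
    else parseAuxA inner [] none []

-- ===== PORT B =====
def parse_values_list_py_alt (values_part : String) : Option (List String) :=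
  let s := PySem.Chars.strip values_part.toList
  if !(PySem.Chars.startswith s ['('] && PySem.Chars.endswith s [')']) then none
  else
    let inner := PySem.Chars.strip (PySem.List.slice s (some 1) (some (-1)))
    if inner = [] then some []
    else
      -- one scan: collect the indices of unquoted commas
      let st := (PySem.List.enumerate inner 0).foldl
        (fun (st : Option Char × List Int) p =>
          if pvIsQuote p.2 then
            ((match st.1 with
              | none => some p.2
              | some qc => if qc == p.2 then none else some qc), st.2)
          else if p.2 == ',' && st.1 == none then (st.1, st.2 ++ [p.1])
          else st) (none, [])
      let cuts := st.2
      let starts := (0 : Int) :: cuts.map (· + 1)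
      let ends := cuts ++ [PySem.List.len inner]
      let toks := (starts.zip ends).map
        (fun ab => PySem.Chars.strip (PySem.List.slice inner (some ab.1) (some ab.2)))
      if toks.contains [] then none else some (toks.map String.ofList)

-- ===== PRECONDITION & SPEC =====
def Spec_parse_values_list_py (values_part : String) (out : Option (List String)) : Prop := out = parse_values_list_py_alt values_part
instance (values_part : String) (out : Option (List String)) : Decidable (Spec_parse_values_list_py values_part out) := by unfold Spec_parse_values_list_py; infer_instance

-- ===== CLAIM (what is proved, stated in full; the proofs are below) =====
def Claim_equal_parse_values_list_py : Prop := ∀ (values_part : String), Dom_parse_values_list_py values_part → Spec_parse_values_list_py values_part (parse_values_list_py values_part)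

-- ===== LEMMAS AND PROOFS =====

-- ghost: quote-state update
def updQ (q : Option Char) (c : Char) : Option Char :=
  match q with
  | none => some c
  | some qc => if qc == c then none else some qc

def consHead (c : Char) : List (List Char) → List (List Char)
  | [] => [[c]]
  | s :: t => (c :: s) :: t

-- ghost: the raw segments of cs split at top-level commas, starting in quote state q
def segs : Option Char → List Char → List (List Char)
  | _, [] => [[]]
  | q, c :: cs =>
    if pvIsQuote c then consHead c (segs (updQ q c) cs)
    else if c == ',' && q == none then [] :: segs none cs
    else consHead c (segs q cs)

-- ghost: relative indices of top-level commas
def relCuts : Option Char → List Char → List Nat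
  | _, [] => []
  | q, c :: cs =>
    if pvIsQuote c then (relCuts (updQ q c) cs).map (· + 1)
    else if c == ',' && q == none then 0 :: (relCuts none cs).map (· + 1)
    else (relCuts q cs).map (· + 1)

-- ghost: final quote state after scanning cs
def finalQ : Option Char → List Char → Option Char
  | q, [] => q
  | q, c :: cs => finalQ (if pvIsQuote c then updQ q c else q) cs

def headApp (buf : List Char) : List (List Char) → List (List Char)
  | [] => [buf]
  | s :: t => (buf ++ s) :: t

lemma segs_ne_nil (q : Option Char) (cs : List Char) : segs q cs ≠ [] := by
  induction cs generalizing q with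
  | nil => simp [segs]
  | cons c cs ih =>
    simp only [segs]
    split_ifs with h1 h2
    · cases h : segs (updQ q c) cs <;> simp [consHead]
    · simp
    · cases h : segs q cs <;> simp [consHead]

lemma headApp_consHead (buf : List Char) (c : Char) (ss : List (List Char)) :
    headApp (buf ++ [c]) ss = headApp buf (consHead c ss) := by
  cases ss <;> simp [headApp, consHead]

lemma headApp_nil (ss : List (List Char)) (h : ss ≠ []) : headApp [] ss = ss := by
  cases ss <;> simp_all [headApp]

lemma auxA_eq (cs : List Char) : ∀ (buf : List Char) (q : Option Char) (res : List String),
    parseAuxA cs buf q res =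
      (if (headApp buf (segs q cs)).any (fun s => PySem.Chars.strip s == []) then none
       else some (res ++ (headApp buf (segs q cs)).map (fun s => String.ofList (PySem.Chars.strip s)))) := by
  induction cs with
  | nil =>
    intro buf q res
    simp only [parseAuxA, segs, headApp, List.any_cons, List.any_nil, List.map]
    split_ifs with h h2 h2 <;> simp_all
  | cons c cs ih =>
    intro buf q res
    have hupd : (match q with
           | none => some c
           | some qc => if qc == c then none else some qc) = updQ q c := rfl
    simp only [parseAuxA, segs, hupd]
    by_cases h1 : pvIsQuote c = true
    · rw [if_pos h1, if_pos h1, ih, ← headApp_consHead]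
    · rw [if_neg h1, if_neg h1]
      by_cases h2 : (c == ',' && q == none) = true
      · rw [if_pos h2, if_pos h2]
        have hq : q = none := by cases q <;> simp_all
        subst hq
        rw [ih, headApp_nil _ (segs_ne_nil _ _)]
        by_cases hb : PySem.Chars.strip buf = []
        · simp [hb, headApp]
        · rw [if_neg hb]
          cases hs : segs none cs with
          | nil => exact absurd hs (segs_ne_nil _ _)
          | cons s t =>
            simp [hb, headApp, List.append_assoc]
      · rw [if_neg h2, if_neg h2, ih, ← headApp_consHead]

lemma shift_cast (k : Int) (r : List Nat) :
    (r.map (· + 1)).map (fun j : Nat => k + (j : Int)) = r.map (fun j : Nat => (k + 1) + (j : Int)) := by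
  rw [List.map_map]
  congr 1
  funext j
  simp only [Function.comp]
  push_cast
  ring

lemma cuts_fold (cs : List Char) : ∀ (q : Option Char) (k : Int) (acc : List Int),
    (PySem.List.enumerate cs k).foldl
        (fun (st : Option Char × List Int) p =>
          if pvIsQuote p.2 then
            ((match st.1 with
              | none => some p.2
              | some qc => if qc == p.2 then none else some qc), st.2)
          else if p.2 == ',' && st.1 == none then (st.1, st.2 ++ [p.1])
          else st) (q, acc)
      = (finalQ q cs, acc ++ (relCuts q cs).map (fun j : Nat => k + (j : Int))) := by
  induction cs with
  | nil => intro q k acc; simp [PySem.List.enumerate_nil, relCuts, finalQ]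
  | cons c cs ih =>
    intro q k acc
    rw [PySem.List.enumerate_cons, List.foldl_cons]
    have hupd : (match q with
           | none => some c
           | some qc => if qc == c then none else some qc) = updQ q c := rfl
    simp only [hupd]
    by_cases h1 : pvIsQuote c = true
    · simp only [if_pos h1, ih, finalQ, relCuts, shift_cast]
    · rw [if_neg h1]
      by_cases h2 : (c == ',' && q == none) = true
      · rw [if_pos h2]
        have hq : q = none := by cases q <;> simp_all
        subst hq
        simp only [ih, finalQ, relCuts, if_neg h1, if_pos h2, shift_cast, List.map_cons]
        rw [List.append_assoc]
        norm_num
      · rw [if_neg h2]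
        simp only [ih, finalQ, relCuts, if_neg h1, if_neg h2, shift_cast]

-- ghost tokenization by slicing at cut indices
def pairsOf (cuts : List Nat) (n : Nat) : List (Nat × Nat) :=
  ((0 :: cuts.map (· + 1)).zip (cuts ++ [n]))

def tokensOf (cs : List Char) (cuts : List Nat) : List (List Char) :=
  (pairsOf cuts cs.length).map (fun ab => (cs.drop ab.1).take (ab.2 - ab.1))

lemma zip_tokens_shift (c : Char) (cs : List Char) (as bs : List Nat) :
    ((as.map (· + 1)).zip (bs.map (· + 1))).map (fun ab => ((c :: cs).drop ab.1).take (ab.2 - ab.1))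
      = (as.zip bs).map (fun ab => (cs.drop ab.1).take (ab.2 - ab.1)) := by
  rw [List.zip_map, List.map_map]
  congr 1
  funext ab
  simp [Function.comp, Nat.succ_sub_succ]

lemma tokensOf_sep (c : Char) (cs : List Char) (cuts : List Nat) :
    tokensOf (c :: cs) (0 :: cuts.map (· + 1)) = [] :: tokensOf cs cuts := by
  simp only [tokensOf, pairsOf]
  rw [show ((0 :: cuts.map (· + 1)) ++ [(c :: cs).length]) = 0 :: ((cuts ++ [cs.length]).map (· + 1)) from by simp]
  rw [List.zip_cons_cons, List.map_cons, zip_tokens_shift]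
  simp

lemma tokensOf_shift (c : Char) (cs : List Char) (cuts : List Nat) :
    tokensOf (c :: cs) (cuts.map (· + 1)) = consHead c (tokensOf cs cuts) := by
  cases cuts with
  | nil =>
    simp [tokensOf, pairsOf, consHead]
  | cons j rest =>
    simp only [tokensOf, pairsOf]
    rw [show (((j :: rest).map (· + 1)) ++ [(c :: cs).length]) = (j + 1) :: ((rest ++ [cs.length]).map (· + 1)) from by simp]
    rw [List.zip_cons_cons, List.map_cons, zip_tokens_shift]
    rw [show ((j :: rest) ++ [cs.length]) = j :: (rest ++ [cs.length]) from rfl]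
    rw [List.zip_cons_cons, List.map_cons]
    simp [consHead]

lemma tokensOf_eq_segs (cs : List Char) : ∀ (q : Option Char),
    tokensOf cs (relCuts q cs) = segs q cs := by
  induction cs with
  | nil => intro q; simp [tokensOf, pairsOf, relCuts, segs]
  | cons c cs ih =>
    intro q
    simp only [relCuts, segs]
    by_cases h1 : pvIsQuote c = true
    · rw [if_pos h1, if_pos h1, tokensOf_shift, ih]
    · rw [if_neg h1, if_neg h1]
      by_cases h2 : (c == ',' && q == none) = true
      · rw [if_pos h2, if_pos h2, tokensOf_sep, ih]
      · rw [if_neg h2, if_neg h2, tokensOf_shift, ih]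

lemma cast_shift (r : List Nat) :
    (r.map (Nat.cast : Nat → Int)).map (· + 1) = (r.map (· + 1)).map (Nat.cast : Nat → Int) := by
  rw [List.map_map, List.map_map]
  congr 1


-- ===== VERDICT (by name: the statement is the Claim_ definition above) =====
lemma core_eq (inner : List Char) :
    parseAuxA inner [] none []
      = (let st := (PySem.List.enumerate inner 0).foldl
            (fun (st : Option Char × List Int) p =>
              if pvIsQuote p.2 then
                ((match st.1 with
                  | none => some p.2
                  | some qc => if qc == p.2 then none else some qc), st.2)
              else if p.2 == ',' && st.1 == none then (st.1, st.2 ++ [p.1])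
              else st) (none, [])
         let cuts := st.2
         let starts := (0 : Int) :: cuts.map (· + 1)
         let ends := cuts ++ [PySem.List.len inner]
         let toks := (starts.zip ends).map
            (fun ab => PySem.Chars.strip (PySem.List.slice inner (some ab.1) (some ab.2)))
         if toks.contains [] then none else some (toks.map String.ofList)) := by
  rw [auxA_eq, headApp_nil _ (segs_ne_nil _ _), cuts_fold]
  dsimp only
  simp only [List.nil_append, zero_add]
  set r := relCuts none inner with hr
  have e3 : PySem.List.len inner = (inner.length : Int) := by simp [PySem.List.len_eq]
  rw [cast_shift, e3]
  have e4 : (List.map (fun j : Nat => (j : Int)) r) = r.map (Nat.cast : Nat → Int) := rfl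
  rw [e4]
  rw [show (r.map (Nat.cast : Nat → Int) ++ [(inner.length : Int)])
        = ((r ++ [inner.length]).map (Nat.cast : Nat → Int)) from by simp]
  rw [show ((0 : Int) :: (r.map (· + 1)).map (Nat.cast : Nat → Int))
        = ((0 :: r.map (· + 1)).map (Nat.cast : Nat → Int)) from rfl]
  rw [List.zip_map]
  have hmap : List.map (fun ab => PySem.Chars.strip (PySem.List.slice inner (some ab.1) (some ab.2)))
        (((0 :: r.map (· + 1)).zip (r ++ [inner.length])).map
          (Prod.map (Nat.cast : Nat → Int) (Nat.cast : Nat → Int)))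
      = List.map PySem.Chars.strip (segs none inner) := by
    rw [List.map_map, ← tokensOf_eq_segs inner none, tokensOf, ← hr]
    rw [show pairsOf r inner.length = (0 :: r.map (· + 1)).zip (r ++ [inner.length]) from rfl]
    rw [List.map_map]
    congr 1
    funext ab
    simp [Function.comp, PySem.List.slice_natCast]
  rw [hmap]
  have hcond : (List.map PySem.Chars.strip (segs none inner)).contains ([] : List Char)
      = (segs none inner).any (fun s => PySem.Chars.strip s == []) := by
    simp [List.any_eq, List.isEmpty_iff]
  rw [hcond, List.map_map]
  rfl

theorem parse_values_list_py_spec : Claim_equal_parse_values_list_py := by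
  intro vp _
  unfold Spec_parse_values_list_py parse_values_list_py parse_values_list_py_alt
  dsimp only
  by_cases hg : (!(PySem.Chars.startswith (PySem.Chars.strip vp.toList) ['('] &&
      PySem.Chars.endswith (PySem.Chars.strip vp.toList) [')'])) = true
  · simp only [if_pos hg]
  · simp only [if_neg hg]
    by_cases hi : PySem.Chars.strip (PySem.List.slice (PySem.Chars.strip vp.toList) (some 1) (some (-1))) = []
    · simp only [if_pos hi]
    · simp only [if_neg hi]
      exact core_eq _
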